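-- pv_equiv track=rewrite | github.com/kaladharusc/558_knowledge_graphs | kaladharreddy_mummadi_hw4/extract.py | get_formatted_string
-- ===== SOURCE A (Python) =====
-- def get_start_end(c, is_start=True):
--     if is_start:
--         return "<{0}>".format(c)
--     else:
--         return "</{0}>".format(c)
--
-- def get_formatted_string(one_line):
--     w, c = one_line[0]
--     res = [get_start_end(c), w]
--     last_tag = c
--     for w, c in one_line[1:]:
--         if last_tag == c:
--             res.append(w)
--         else:
--             res.append(get_start_end(last_tag, False))
--             last_tag = c
--             res.append(get_start_end(c))
--             res.append(w)
--     res.append(get_start_end(last_tag, False))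
--     return " ".join(res)
-- ===== SOURCE B (Python) =====
-- def get_formatted_string(one_line):
--     parts = []
--     i, n = 0, len(one_line)
--     while i < n:
--         tag = one_line[i][1]
--         j = i + 1
--         while j < n and one_line[j][1] == tag:
--             j += 1
--         parts.append("<{0}>".format(tag))
--         for w, _ in one_line[i:j]:
--             parts.append(w)
--         parts.append("</{0}>".format(tag))
--         i = j
--     return " ".join(parts)
-- ===== Notes on version B (the rewrite author's own statement) =====
-- stated objective: alternative
-- what changed: Replaces A's last_tag state machine with manual open/close branching by a run-grouping scan: find each maximal run of equal consecutive tags, then emit <tag>, the run's words, </tag> per run.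
import Mathlib
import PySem

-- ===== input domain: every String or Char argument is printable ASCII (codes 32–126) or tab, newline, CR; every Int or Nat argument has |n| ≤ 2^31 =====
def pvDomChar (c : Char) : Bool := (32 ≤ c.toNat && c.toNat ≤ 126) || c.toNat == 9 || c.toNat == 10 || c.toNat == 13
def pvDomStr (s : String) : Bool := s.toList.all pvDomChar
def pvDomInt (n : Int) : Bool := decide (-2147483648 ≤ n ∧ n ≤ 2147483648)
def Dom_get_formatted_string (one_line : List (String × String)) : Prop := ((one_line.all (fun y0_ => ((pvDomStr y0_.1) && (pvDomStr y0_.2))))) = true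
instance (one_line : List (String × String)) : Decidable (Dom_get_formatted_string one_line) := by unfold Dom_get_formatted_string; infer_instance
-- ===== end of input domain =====

-- B replaces A's last_tag state machine by a run-grouping scan (alternative decomposition, same cost).

-- ===== PORT A =====
def get_start_end (c : String) (is_start : Bool) : String :=
  if is_start then "<" ++ c ++ ">" else "</" ++ c ++ ">"

def get_formatted_string (one_line : List (String × String)) : String :=
  match one_line with
  | [] => ""          -- one_line[0] raises IndexError in Python; excluded by Pre_
  | (w, c) :: rest =>
      let res : List String := [get_start_end c true, w]
      let st := rest.foldl (fun (acc : List String × String) wc =>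
        if acc.2 == wc.2 then (acc.1 ++ [wc.1], acc.2)
        else (acc.1 ++ [get_start_end acc.2 false, get_start_end wc.2 true, wc.1], wc.2))
        (res, c)
      PySem.Str.join " " (st.1 ++ [get_start_end st.2 false])

-- ===== PORT B =====
-- one run per recursive step: the leading token's tag, the maximal run of that tag, recurse on the remainder
def gfsRuns : List (String × String) → List String
  | [] => []
  | (w, tag) :: rest =>
      let grp := rest.takeWhile (fun p => p.2 == tag)
      let rest' := rest.dropWhile (fun p => p.2 == tag)
      (("<" ++ tag ++ ">") :: w :: grp.map Prod.fst) ++ (("</" ++ tag ++ ">") :: gfsRuns rest')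
termination_by l => l.length
decreasing_by
  exact Nat.lt_succ_of_le (List.length_dropWhile_le _ _)

def get_formatted_string_alt (one_line : List (String × String)) : String :=
  PySem.Str.join " " (gfsRuns one_line)

-- ===== PRECONDITION & SPEC =====
-- Pre_ excludes only the empty list, on which Python A raises IndexError.
def Pre_get_formatted_string (one_line : List (String × String)) : Prop := one_line ≠ []
instance (one_line : List (String × String)) : Decidable (Pre_get_formatted_string one_line) := by unfold Pre_get_formatted_string; infer_instance
def pvWitness_get_formatted_string : (List (String × String)) := [("hi", "T"), ("yo", "T"), ("x", "S")]

def Spec_get_formatted_string (one_line : List (String × String)) (out : String) : Prop := out = get_formatted_string_alt one_line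
instance (one_line : List (String × String)) (out : String) : Decidable (Spec_get_formatted_string one_line out) := by unfold Spec_get_formatted_string; infer_instance

-- ===== CLAIM (what is proved, stated in full; the proofs are below) =====
def Claim_equal_get_formatted_string : Prop := ∀ (one_line : List (String × String)), Dom_get_formatted_string one_line → Pre_get_formatted_string one_line → Spec_get_formatted_string one_line (get_formatted_string one_line)

-- ===== LEMMAS AND PROOFS =====

-- what B emits after an already-open run of tag c
def gfsTail (c : String) (rest : List (String × String)) : List String :=
  (rest.takeWhile (fun p => p.2 == c)).map Prod.fst ++
    (("</" ++ c ++ ">") :: gfsRuns (rest.dropWhile (fun p => p.2 == c)))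

theorem gfsRuns_nil : gfsRuns [] = [] := by simp [gfsRuns]

theorem gfsRuns_cons (w tag : String) (rest : List (String × String)) :
    gfsRuns ((w, tag) :: rest) = ("<" ++ tag ++ ">") :: w :: gfsTail tag rest := by
  unfold gfsRuns gfsTail
  simp

theorem gfsTail_cons_ne (c w d : String) (tl : List (String × String)) (hb : (d == c) = false) :
    gfsTail c ((w, d) :: tl) = ("</" ++ c ++ ">") :: gfsRuns ((w, d) :: tl) := by
  simp [gfsTail, hb]

-- A's loop invariant: the folded result followed by the final close equals acc ++ B's tail
theorem foldA_eq_tail (rest : List (String × String)) : ∀ (acc : List String) (c : String),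
    (rest.foldl (fun (acc : List String × String) wc =>
        if acc.2 == wc.2 then (acc.1 ++ [wc.1], acc.2)
        else (acc.1 ++ [get_start_end acc.2 false, get_start_end wc.2 true, wc.1], wc.2))
      (acc, c)).1 ++
      [get_start_end
        ((rest.foldl (fun (acc : List String × String) wc =>
            if acc.2 == wc.2 then (acc.1 ++ [wc.1], acc.2)
            else (acc.1 ++ [get_start_end acc.2 false, get_start_end wc.2 true, wc.1], wc.2))
          (acc, c)).2) false] = acc ++ gfsTail c rest := by
  induction rest with
  | nil => intro acc c; simp [gfsTail, gfsRuns_nil, get_start_end]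
  | cons hd tl ih =>
      intro acc c
      obtain ⟨w, d⟩ := hd
      by_cases h : c = d
      · subst h
        simp only [List.foldl_cons, BEq.rfl, if_true]
        rw [ih]
        simp [gfsTail]
      · have hb' : (d == c) = false := by simp [Ne.symm h]
        simp only [List.foldl_cons]
        rw [if_neg (by simp [h])]
        rw [ih, gfsTail_cons_ne c w d tl hb', gfsRuns_cons]
        simp [get_start_end]

-- ===== VERDICT (by name: the statement is the Claim_ definition above) =====
theorem get_formatted_string_spec : Claim_equal_get_formatted_string := by
  intro one_line _ hpre
  unfold Spec_get_formatted_string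
  match one_line with
  | [] => exact absurd rfl hpre
  | (w, c) :: rest =>
      show get_formatted_string ((w, c) :: rest) = get_formatted_string_alt ((w, c) :: rest)
      simp only [get_formatted_string, get_formatted_string_alt]
      rw [gfsRuns_cons, foldA_eq_tail rest [get_start_end c true, w] c]
      simp [get_start_end]
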